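-- pv_equiv track=rewrite | github.com/SaidazimovToxir/Leetcode-solutions-in-Python | PythonSolutions/2384-largest_palindromic_number.py | largest_palindromic_number
-- ===== SOURCE A (Python) =====
-- def largest_palindromic_number(num):
--     dict1 = {}
--
--     for i in num:
--         if i in dict1:
--             dict1[i] += 1
--         else:
--             dict1[i] = 1
--
--     keys = list(dict1.keys())
--     keys.sort()
--
--     max1 = -1
--     res = ''
--
--     for i in keys:
--         if dict1[i] >= 2:
--             res += i * (dict1[i] // 2)
--             if dict1[i] % 2 != 0:
--                 max1 = max(int(i), max1)
--         else:
--             max1 = max(int(i), max1)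
--
--     if res == '':
--         return str(max1)
--     elif res[-1] == '0' and res[0] == '0' and max1 == -1:
--         return '0'
--
--     if res[-1] == '0':
--         res = ''
--
--     return res[::-1] + (str(max1) if max1 != -1 else '') + res
-- ===== SOURCE B (Python) =====
-- def largest_palindromic_number(num):
--     s = sorted(num, reverse=True)
--     half = []
--     center = -1
--     i = 0
--     n = len(s)
--     while i < n:
--         if i + 1 < n and s[i] == s[i + 1]:
--             half.append(s[i])
--             i += 2
--         else:
--             if center == -1:
--                 center = int(s[i])
--             i += 1
--     if not half:
--         return str(center)
--     if center == -1 and all(c == '0' for c in half):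
--         return '0'
--     if half[0] == '0':
--         half = []
--     mid = str(center) if center != -1 else ''
--     return ''.join(half) + mid + ''.join(reversed(half))
-- ===== Notes on version B (the rewrite author's own statement) =====
-- stated objective: alternative
-- what changed: B replaces A's frequency dictionary + ascending key loop by sorting the characters in descending order once and pairing adjacent equal characters in a single scan, taking the first unpaired character as the palindrome center.
import Mathlib
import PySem

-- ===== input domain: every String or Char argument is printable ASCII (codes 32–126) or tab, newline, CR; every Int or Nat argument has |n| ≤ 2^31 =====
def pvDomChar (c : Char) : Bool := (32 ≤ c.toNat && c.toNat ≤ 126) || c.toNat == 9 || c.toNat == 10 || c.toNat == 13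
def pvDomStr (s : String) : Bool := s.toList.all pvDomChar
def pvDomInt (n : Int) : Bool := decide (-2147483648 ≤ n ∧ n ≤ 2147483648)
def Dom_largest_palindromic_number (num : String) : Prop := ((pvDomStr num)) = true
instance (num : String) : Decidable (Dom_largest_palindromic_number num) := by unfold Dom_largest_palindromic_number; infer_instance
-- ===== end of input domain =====

-- B: instead of A's frequency dictionary + ascending key loop, B sorts the characters
-- descending once and pairs adjacent equal characters in one scan (objective: alternative).
-- Equivalence is about the return value; neither program mutates its argument.


-- int(i) for a one-character string i; none = ValueError, excluded by Pre_ (both Pythons call int the same way)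
def pyIntChar (c : Char) : Int := (PySem.Int.ofChars? [c]).getD 0

-- ===== PORT A =====
def largest_palindromic_number (num : String) : String :=
  let cs := num.toList
  let dict1 := cs.foldl
    (fun d i => if d.contains i then d.insert i (d.getD i 0 + 1) else d.insert i 1)
    PySem.Dict.empty
  let keys := PySem.List.sorted dict1.keys (fun x => x) false
  let p := keys.foldl
    (fun (p : Int × List Char) i =>
      if 2 ≤ dict1.getD i 0 then
        let res := p.2 ++ List.replicate (PySem.Int.floordiv (dict1.getD i 0) 2).toNat i
        if PySem.Int.mod (dict1.getD i 0) 2 ≠ 0 then (max (pyIntChar i) p.1, res)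
        else (p.1, res)
      else (max (pyIntChar i) p.1, p.2))
    ((-1 : Int), ([] : List Char))
  let max1 := p.1
  let res := p.2
  if res = [] then PySem.Int.toStr max1
  else if res.getLast? = some '0' ∧ res.head? = some '0' ∧ max1 = -1 then "0"
  else
    let res := if res.getLast? = some '0' then ([] : List Char) else res
    String.mk (res.reverse ++ (if max1 ≠ -1 then (PySem.Int.toStr max1).toList else []) ++ res)

-- ===== PORT B =====
-- B's while loop over i with the s[i] == s[i+1] lookahead, as structural recursion on the list
def pairScan : List Char → Int → (List Char × Int)
  | [], c => ([], c)
  | [x], c => ([], if c = -1 then pyIntChar x else c)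
  | x :: y :: rest, c =>
      if x = y then
        let r := pairScan rest c
        (x :: r.1, r.2)
      else
        pairScan (y :: rest) (if c = -1 then pyIntChar x else c)

def largest_palindromic_number_alt (num : String) : String :=
  let s := PySem.List.sorted num.toList (fun x => x) true
  let r := pairScan s (-1)
  let half := r.1
  let center := r.2
  if half = [] then PySem.Int.toStr center
  else if center = -1 ∧ half.all (fun c => c = '0') then "0"
  else
    let half := if half.headI = '0' then ([] : List Char) else half
    String.mk (half ++ (if center ≠ -1 then (PySem.Int.toStr center).toList else []) ++ half.reverse)

-- ===== PRECONDITION & SPEC =====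
-- Pre_ excludes exactly the inputs where A raises ValueError: a character with odd
-- multiplicity that is not an ASCII digit makes A call int() on it.
def Pre_largest_palindromic_number (num : String) : Prop :=
  ((num.toList.filter (fun c => num.toList.count c % 2 = 1)).all Char.isDigit) = true
instance (num : String) : Decidable (Pre_largest_palindromic_number num) := by
  unfold Pre_largest_palindromic_number; infer_instance
def pvWitness_largest_palindromic_number : String := "4449"

def Spec_largest_palindromic_number (num : String) (out : String) : Prop :=
  out = largest_palindromic_number_alt num
instance (num : String) (out : String) : Decidable (Spec_largest_palindromic_number num out) := by
  unfold Spec_largest_palindromic_number; infer_instance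

-- ===== CLAIM (what is proved, stated in full; the proofs are below) =====
def Claim_equal_largest_palindromic_number : Prop :=
  ∀ (num : String), Dom_largest_palindromic_number num →
    Pre_largest_palindromic_number num →
    Spec_largest_palindromic_number num (largest_palindromic_number num)

-- ===== LEMMAS AND PROOFS =====

theorem digit_bounds (c : Char) (h : c.isDigit = true) : 48 ≤ c.toNat ∧ c.toNat ≤ 57 := by
  simpa [Char.isDigit, UInt32.le_iff_toNat_le] using h

theorem digit_cases (c : Char) (h : c.isDigit = true) :
    c = '0' ∨ c = '1' ∨ c = '2' ∨ c = '3' ∨ c = '4' ∨ c = '5' ∨ c = '6' ∨ c = '7' ∨ c = '8' ∨ c = '9' := by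
  obtain ⟨h1, h2⟩ := digit_bounds c h
  have hc := Char.ofNat_toNat c
  have hn : c.toNat = 48 ∨ c.toNat = 49 ∨ c.toNat = 50 ∨ c.toNat = 51 ∨ c.toNat = 52 ∨ c.toNat = 53
      ∨ c.toNat = 54 ∨ c.toNat = 55 ∨ c.toNat = 56 ∨ c.toNat = 57 := by omega
  rcases hn with h|h|h|h|h|h|h|h|h|h <;> (rw [h] at hc; rw [← hc]; decide)

theorem pyIntChar_digit (c : Char) (h : c.isDigit = true) :
    pyIntChar c = (c.toNat : Int) - 48 := by
  rcases digit_cases c h with h|h|h|h|h|h|h|h|h|h <;> subst h <;> decide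

theorem pyIntChar_nonneg (c : Char) (h : c.isDigit = true) : 0 ≤ pyIntChar c := by
  rw [pyIntChar_digit c h]
  have := (digit_bounds c h).1
  omega

theorem pyIntChar_mono {a b : Char} (ha : a.isDigit = true) (hb : b.isDigit = true)
    (hab : a ≤ b) : pyIntChar a ≤ pyIntChar b := by
  rw [pyIntChar_digit a ha, pyIntChar_digit b hb]
  rw [Char.le_def, UInt32.le_iff_toNat_le] at hab
  have : a.toNat ≤ b.toNat := hab
  omega

-- the center update of one run / the run decompositions used to characterise both programs
def cUpd (n : Nat) (k : Char) (c : Int) : Int :=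
  if n % 2 = 1 then (if c = -1 then pyIntChar k else c) else c

def fullOf (cs : List Char) (ks : List Char) : List Char :=
  ks.flatMap (fun k => List.replicate (cs.count k) k)

def halfOf (cs : List Char) (ks : List Char) : List Char :=
  ks.flatMap (fun k => List.replicate (cs.count k / 2) k)

def centerFold (cs : List Char) (ks : List Char) (c : Int) : Int :=
  ks.foldl (fun c k => cUpd (cs.count k) k c) c

theorem mem_fullOf {cs ks : List Char} {y : Char} (h : y ∈ fullOf cs ks) : y ∈ ks := by
  unfold fullOf at h
  simp only [List.mem_flatMap, List.mem_replicate] at h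
  obtain ⟨k, hk, -, rfl⟩ := h
  exact hk

theorem mem_halfOf {cs ks : List Char} {y : Char} (h : y ∈ halfOf cs ks) : y ∈ ks := by
  unfold halfOf at h
  simp only [List.mem_flatMap, List.mem_replicate] at h
  obtain ⟨k, hk, -, rfl⟩ := h
  exact hk

-- pairScan on one maximal run of equal characters
theorem pairScan_run (m : Nat) (k : Char) (t : List Char) (c : Int)
    (ht : ∀ y, t.head? = some y → y ≠ k) :
    pairScan (List.replicate m k ++ t) c =
      (List.replicate (m / 2) k ++ (pairScan t (cUpd m k c)).1,
       (pairScan t (cUpd m k c)).2) := by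
  induction m using Nat.strong_induction_on generalizing c with
  | _ m ih =>
    match m with
    | 0 => simp [cUpd]
    | 1 =>
      cases t with
      | nil => simp [pairScan, cUpd]
      | cons y r =>
        have hy : y ≠ k := ht y rfl
        simp [pairScan, List.replicate, Ne.symm hy, cUpd]
    | (n+2) =>
      have he : List.replicate (n+2) k ++ t = k :: k :: (List.replicate n k ++ t) := by
        simp [List.replicate_succ]
      rw [he]
      have hrec := ih n (by omega) c
      simp only [pairScan, hrec]
      have h2 : (n+2) / 2 = n / 2 + 1 := by omega
      have hm : (n+2) % 2 = n % 2 := by omega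
      simp [cUpd, h2, hm, List.replicate_succ]

-- pairScan on a strictly descending sequence of runs
theorem pairScan_full (cs : List Char) (ks : List Char)
    (hp : ks.Pairwise (fun a b => b < a)) (c : Int) :
    pairScan (fullOf cs ks) c = (halfOf cs ks, centerFold cs ks c) := by
  induction ks generalizing c with
  | nil => simp [fullOf, halfOf, centerFold, pairScan]
  | cons k ks' ih =>
    rw [List.pairwise_cons] at hp
    have hfull : fullOf cs (k :: ks') = List.replicate (cs.count k) k ++ fullOf cs ks' := by
      simp [fullOf]
    have ht : ∀ y, (fullOf cs ks').head? = some y → y ≠ k := by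
      intro y hy
      have hmem : y ∈ (fullOf cs ks').head? := by rw [hy]; rfl
      exact ne_of_lt (hp.1 y (mem_fullOf (List.mem_of_mem_head? hmem)))
    rw [hfull, pairScan_run _ _ _ _ ht, ih hp.2]
    simp [halfOf, centerFold]

-- A's dictionary is the counter
theorem dictA_eq_counter (cs : List Char) :
    cs.foldl (fun d i => if d.contains i then d.insert i (d.getD i 0 + 1) else d.insert i 1)
      PySem.Dict.empty = PySem.Dict.counter cs := by
  have hfun : (fun (d : PySem.Dict Char Int) i =>
      if d.contains i then d.insert i (d.getD i 0 + 1) else d.insert i 1)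
      = fun (d : PySem.Dict Char Int) i => d.insert i (d.getD i 0 + 1) := by
    funext d i
    by_cases h : d.contains i = true
    · simp [h]
    · have h0 : d.getD i 0 = 0 :=
        PySem.Dict.getD_of_not_contains d 0 (by simpa using h)
      simp [h, h0]
  rw [hfun, PySem.Dict.foldl_insert_getD_add_one_eq_counter]

theorem int_bridges (n : Nat) :
    (PySem.Int.floordiv (n : Int) 2).toNat = n / 2 ∧ PySem.Int.mod (n : Int) 2 = ((n % 2 : Nat) : Int) := by
  constructor
  · show ((n : Int).fdiv 2).toNat = n / 2
    cases n <;> simp [Int.fdiv] <;> omega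
  · show ((n : Int).fmod 2) = ((n % 2 : Nat) : Int)
    rw [Int.fmod_eq_emod]; omega

-- A's accumulation loop
theorem foldA_eq (cs : List Char) (ks : List Char) (hc : ∀ k ∈ ks, 1 ≤ cs.count k)
    (m0 : Int) (r0 : List Char) :
    ks.foldl
      (fun (p : Int × List Char) i =>
        if 2 ≤ (PySem.Dict.counter cs).getD i 0 then
          let res := p.2 ++ List.replicate
            (PySem.Int.floordiv ((PySem.Dict.counter cs).getD i 0) 2).toNat i
          if PySem.Int.mod ((PySem.Dict.counter cs).getD i 0) 2 ≠ 0 then (max (pyIntChar i) p.1, res)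
          else (p.1, res)
        else (max (pyIntChar i) p.1, p.2)) (m0, r0) =
      (ks.foldl (fun m k => if cs.count k % 2 = 1 then max (pyIntChar k) m else m) m0,
       r0 ++ halfOf cs ks) := by
  induction ks generalizing m0 r0 with
  | nil => simp [halfOf]
  | cons k ks' ih =>
    have hk1 : 1 ≤ cs.count k := hc k List.mem_cons_self
    have hc' : ∀ x ∈ ks', 1 ≤ cs.count x := fun x hx => hc x (List.mem_cons_of_mem _ hx)
    obtain ⟨hdiv, hmod⟩ := int_bridges (cs.count k)
    have hstep : (if 2 ≤ (PySem.Dict.counter cs).getD k 0 then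
          let res := (m0, r0).2 ++ List.replicate
            (PySem.Int.floordiv ((PySem.Dict.counter cs).getD k 0) 2).toNat k
          if PySem.Int.mod ((PySem.Dict.counter cs).getD k 0) 2 ≠ 0 then (max (pyIntChar k) (m0, r0).1, res)
          else ((m0, r0).1, res)
        else (max (pyIntChar k) (m0, r0).1, (m0, r0).2))
        = (if cs.count k % 2 = 1 then max (pyIntChar k) m0 else m0,
           r0 ++ List.replicate (cs.count k / 2) k) := by
      simp only [PySem.Dict.getD_counter, hdiv]
      show (if 2 ≤ ((cs.count k : Nat) : Int) then
          let res := r0 ++ List.replicate (cs.count k / 2) k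
          if PySem.Int.mod ((cs.count k : Nat) : Int) 2 ≠ 0 then (max (pyIntChar k) m0, res)
          else (m0, res)
        else (max (pyIntChar k) m0, r0)) = _
      by_cases h2 : 2 ≤ cs.count k
      · rw [if_pos (show (2 : Int) ≤ ((cs.count k : Nat) : Int) by exact_mod_cast h2)]
        show (if PySem.Int.mod ((cs.count k : Nat) : Int) 2 ≠ 0
            then (max (pyIntChar k) m0, r0 ++ List.replicate (cs.count k / 2) k)
            else (m0, r0 ++ List.replicate (cs.count k / 2) k)) = _
        by_cases hodd : cs.count k % 2 = 1
        · rw [if_pos (show PySem.Int.mod ((cs.count k : Nat) : Int) 2 ≠ 0 by rw [hmod, hodd]; norm_num),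
              if_pos hodd]
        · have h0 : cs.count k % 2 = 0 := by omega
          rw [if_neg (show ¬ PySem.Int.mod ((cs.count k : Nat) : Int) 2 ≠ 0 by rw [hmod, h0]; norm_num),
              if_neg hodd]
      · rw [if_neg (show ¬ (2 : Int) ≤ ((cs.count k : Nat) : Int) by exact_mod_cast h2)]
        have h1 : cs.count k = 1 := by omega
        rw [if_pos (show cs.count k % 2 = 1 by omega)]
        rw [h1]
        norm_num
    rw [List.foldl_cons, List.foldl_cons, hstep, ih hc']
    simp [halfOf]

theorem count_fullOf (cs : List Char) (ks : List Char) (hnd : ks.Nodup) (x : Char) :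
    (fullOf cs ks).count x = if x ∈ ks then cs.count x else 0 := by
  induction ks with
  | nil => simp [fullOf]
  | cons k ks' ih =>
    rw [List.nodup_cons] at hnd
    have : fullOf cs (k :: ks') = List.replicate (cs.count k) k ++ fullOf cs ks' := by
      simp [fullOf]
    rw [this, List.count_append, List.count_replicate, ih hnd.2]
    by_cases hx : x = k
    · subst hx
      simp [hnd.1]
    · simp [hx, Ne.symm hx, List.mem_cons]

theorem full_pairwise (cs : List Char) (ks : List Char)
    (hp : ks.Pairwise (fun a b => b < a)) :
    (fullOf cs ks).Pairwise (fun a b => b ≤ a) := by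
  induction ks with
  | nil => simp [fullOf]
  | cons k ks' ih =>
    rw [List.pairwise_cons] at hp
    have : fullOf cs (k :: ks') = List.replicate (cs.count k) k ++ fullOf cs ks' := by
      simp [fullOf]
    rw [this, List.pairwise_append]
    refine ⟨?_, ih hp.2, ?_⟩
    · exact List.pairwise_replicate.mpr (Or.inr le_rfl)
    · intro a ha b hb
      rw [List.eq_of_mem_replicate ha]
      exact le_of_lt (hp.1 b (mem_fullOf hb))

theorem halfOf_pairwise (cs : List Char) (ks : List Char)
    (hp : ks.Pairwise (fun a b => a < b)) :
    (halfOf cs ks).Pairwise (fun a b => a ≤ b) := by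
  induction ks with
  | nil => simp [halfOf]
  | cons k ks' ih =>
    rw [List.pairwise_cons] at hp
    have : halfOf cs (k :: ks') = List.replicate (cs.count k / 2) k ++ halfOf cs ks' := by
      simp [halfOf]
    rw [this, List.pairwise_append]
    refine ⟨?_, ih hp.2, ?_⟩
    · exact List.pairwise_replicate.mpr (Or.inr le_rfl)
    · intro a ha b hb
      rw [List.eq_of_mem_replicate ha]
      exact le_of_lt (hp.1 b (mem_halfOf hb))

-- the descending sort is the descending sequence of runs
theorem sorted_desc_eq_full (cs : List Char) :
    PySem.List.sorted cs (fun x => x) true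
      = fullOf cs (PySem.List.sorted (PySem.Set.ofList cs) (fun x => x) false).reverse := by
  set ks := PySem.List.sorted (PySem.Set.ofList cs) (fun x => x) false with hks
  have hasc : ks.Pairwise (fun a b => a < b) := PySem.List.sorted_ofList_pairwise_lt cs
  have hdesc : ks.reverse.Pairwise (fun a b => b < a) := by
    rw [List.pairwise_reverse]; exact hasc
  have hndk : ks.Nodup := hasc.imp ne_of_lt
  have hnd : ks.reverse.Nodup := List.nodup_reverse.mpr hndk
  have hmem : ∀ x, x ∈ ks.reverse ↔ x ∈ cs := by
    intro x
    rw [List.mem_reverse, hks, PySem.List.mem_sorted, PySem.Set.mem_ofList]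
  have hperm : cs.Perm (fullOf cs ks.reverse) := by
    rw [List.perm_iff_count]
    intro x
    rw [count_fullOf cs ks.reverse hnd x]
    by_cases hx : x ∈ ks.reverse
    · simp [hx]
    · rw [if_neg hx]
      have : x ∉ cs := fun h => hx ((hmem x).mpr h)
      simp [List.count_eq_zero_of_not_mem this]
  refine List.eq_of_perm_of_sorted (le := fun a b => b ≤ a) ?_ ?_ ?_ ?_
  · intro a b _ _ h1 h2; exact le_antisymm h2 h1
  · exact PySem.List.sorted_pairwise_rev cs (fun x => x)
  · exact full_pairwise cs ks.reverse hdesc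
  · exact (PySem.List.sorted_perm cs (fun x => x) true).trans hperm

-- fold with a guard = fold over the filtered list
theorem foldl_guard_filter {β : Type} (p : Char → Bool) (f : β → Char → β) (l : List Char) (a : β) :
    l.foldl (fun m k => if p k then f m k else m) a = (l.filter p).foldl f a := by
  induction l generalizing a with
  | nil => simp
  | cons k l' ih =>
    by_cases h : p k <;> simp [h, ih]


theorem foldl_first_stay (l : List Char) (c : Int) (hc : c ≠ -1) :
    l.foldl (fun c k => if c = -1 then pyIntChar k else c) c = c := by
  induction l with
  | nil => rfl
  | cons k l' ih => simp [hc, ih]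

theorem foldl_max_le (l : List Char) (B : Int) :
    (∀ k ∈ l, pyIntChar k ≤ B) → ∀ a0, a0 ≤ B →
      l.foldl (fun m k => max (pyIntChar k) m) a0 ≤ B := by
  induction l with
  | nil => exact fun _ _ h0 => h0
  | cons k l' ih =>
    intro hl a0 h0
    exact ih (fun x hx => hl x (List.mem_cons_of_mem _ hx)) _ (max_le (hl k List.mem_cons_self) h0)

-- max-fold (ascending) agrees with first-hit fold (descending)
theorem max_eq_center (cs : List Char) (ks : List Char)
    (hp : ks.Pairwise (fun a b => a < b))
    (hd : ∀ k ∈ ks, cs.count k % 2 = 1 → k.isDigit = true) :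
    ks.foldl (fun m k => if cs.count k % 2 = 1 then max (pyIntChar k) m else m) (-1)
      = centerFold cs ks.reverse (-1) := by
  have hg : (fun (m : Int) k => if cs.count k % 2 = 1 then max (pyIntChar k) m else m)
      = fun (m : Int) k => if decide (cs.count k % 2 = 1) = true then max (pyIntChar k) m else m := by
    funext m k; split_ifs with h1 h2 <;> simp_all
  have hg' : (fun (c : Int) k => cUpd (cs.count k) k c)
      = fun (c : Int) k => if decide (cs.count k % 2 = 1) = true then (if c = -1 then pyIntChar k else c) else c := by
    funext c k; unfold cUpd; split_ifs with h1 h2 <;> simp_all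
  unfold centerFold
  rw [hg, hg', foldl_guard_filter, foldl_guard_filter, List.filter_reverse]
  set O := ks.filter (fun k => decide (cs.count k % 2 = 1)) with hO
  have hOp : O.Pairwise (fun a b => a < b) := hp.filter _
  have hOd : ∀ k ∈ O, k.isDigit = true := by
    intro k hk
    rw [hO, List.mem_filter] at hk
    exact hd k hk.1 (by simpa using hk.2)
  clear_value O
  clear hO
  induction O using List.reverseRecOn with
  | nil => simp
  | append_singleton O' a ih =>
    have hd' : ∀ k ∈ O', k.isDigit = true := fun k hk => hOd k (List.mem_append_left _ hk)
    have hda : a.isDigit = true := hOd a (List.mem_append_right _ List.mem_cons_self)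
    have hlt : ∀ k ∈ O', k < a := by
      have := List.pairwise_append.mp hOp
      intro k hk
      exact this.2.2 k hk a List.mem_cons_self
    rw [List.foldl_append, List.reverse_append]
    simp only [List.reverse_singleton, List.singleton_append, List.foldl_cons, List.foldl_nil]
    rw [if_pos (by trivial)]
    rw [foldl_first_stay _ _ (by have := pyIntChar_nonneg a hda; omega)]
    have hX : List.foldl (fun m k => max (pyIntChar k) m) (-1) O' ≤ pyIntChar a := by
      refine foldl_max_le _ _ ?_ _ (by have := pyIntChar_nonneg a hda; omega)
      intro k hk
      exact pyIntChar_mono (hd' k hk) hda (le_of_lt (hlt k hk))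
    exact max_eq_left hX

-- elements of a ≤-sorted list with '0' at both ends are all '0'
theorem all_zero_of_ends (R : List Char) (hp : R.Pairwise (fun a b => a ≤ b))
    (hh : R.head? = some '0') (hl : R.getLast? = some '0') :
    ∀ x ∈ R, x = '0' := by
  intro x hx
  have h1 : '0' ≤ x := by
    cases R with
    | nil => simp at hx
    | cons a t =>
      have ha : a = '0' := by simpa using hh
      subst ha
      rcases List.mem_cons.mp hx with rfl | hxt
      · exact le_rfl
      · exact (List.pairwise_cons.mp hp).1 x hxt
  have h2 : x ≤ '0' := by
    have hrev : R.reverse.Pairwise (fun a b => b ≤ a) := by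
      rw [List.pairwise_reverse]; exact hp
    have hh' : R.reverse.head? = some '0' := by
      rw [List.head?_reverse]; exact hl
    have hx' : x ∈ R.reverse := List.mem_reverse.mpr hx
    cases hR : R.reverse with
    | nil => rw [hR] at hx'; simp at hx'
    | cons a t =>
      rw [hR] at hh' hx' hrev
      have ha : a = '0' := by simpa using hh'
      subst ha
      rcases List.mem_cons.mp hx' with rfl | hxt
      · exact le_rfl
      · exact (List.pairwise_cons.mp hrev).1 x hxt
  exact le_antisymm h2 h1

-- ===== VERDICT (by name: the statement is the Claim_ definition above) =====
theorem largest_palindromic_number_spec : Claim_equal_largest_palindromic_number := by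
  intro num _hdom hpre0
  unfold Pre_largest_palindromic_number at hpre0
  have hpre : ∀ c ∈ num.toList, num.toList.count c % 2 = 1 → c.isDigit = true := by
    intro c hc hodd
    exact List.all_eq_true.mp hpre0 c (List.mem_filter.mpr ⟨hc, by simp [hodd]⟩)
  unfold Spec_largest_palindromic_number
  show largest_palindromic_number num = largest_palindromic_number_alt num
  unfold largest_palindromic_number largest_palindromic_number_alt
  simp only []
  set cs := num.toList with hcs
  rw [dictA_eq_counter cs, PySem.Dict.keys_counter]
  set ks := PySem.List.sorted (PySem.Set.ofList cs) (fun x => x) false with hks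
  have hasc : ks.Pairwise (fun a b => a < b) := PySem.List.sorted_ofList_pairwise_lt cs
  have hmemks : ∀ x, x ∈ ks ↔ x ∈ cs := by
    intro x; rw [hks, PySem.List.mem_sorted, PySem.Set.mem_ofList]
  have hdig : ∀ k ∈ ks, cs.count k % 2 = 1 → k.isDigit = true := by
    intro k hk hodd
    exact hpre k ((hmemks k).mp hk) hodd
  have hcnt : ∀ k ∈ ks, 1 ≤ cs.count k := by
    intro k hk
    exact List.count_pos_iff.mpr ((hmemks k).mp hk)
  rw [foldA_eq cs ks hcnt]
  rw [sorted_desc_eq_full cs, ← hks,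
      pairScan_full cs ks.reverse (by rw [List.pairwise_reverse]; exact hasc)]
  set M := ks.foldl (fun m k => if cs.count k % 2 = 1 then max (pyIntChar k) m else m) (-1) with hM
  have hMC : M = centerFold cs ks.reverse (-1) := max_eq_center cs ks hasc hdig
  set R := halfOf cs ks with hR
  have hhalf : halfOf cs ks.reverse = R.reverse := by
    rw [hR]
    unfold halfOf
    rw [List.reverse_flatMap]
    congr 1
    funext k
    simp [List.reverse_replicate]
  rw [hhalf, ← hMC]
  simp only [List.nil_append]
  have hRp : R.Pairwise (fun a b => a ≤ b) := halfOf_pairwise cs ks hasc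
  by_cases hRe : R = []
  · rw [if_pos hRe, if_pos (show R.reverse = [] by rw [hRe]; rfl)]
  · rw [if_neg hRe, if_neg (show ¬ R.reverse = [] from by simpa using hRe)]
    -- branch 2: the two all-zero conditions agree
    have hcond : (R.getLast? = some '0' ∧ R.head? = some '0' ∧ M = -1)
        ↔ (M = -1 ∧ R.reverse.all (fun c => c = '0')) := by
      constructor
      · rintro ⟨hl, hh, hm⟩
        refine ⟨hm, ?_⟩
        rw [List.all_eq_true]
        intro x hx
        simp only [decide_eq_true_eq]
        exact all_zero_of_ends R hRp hh hl x (List.mem_reverse.mp hx)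
      · rintro ⟨hm, hall⟩
        rw [List.all_eq_true] at hall
        have hz : ∀ x ∈ R, x = '0' := by
          intro x hx
          simpa using hall x (List.mem_reverse.mpr hx)
        refine ⟨?_, ?_, hm⟩
        · cases hL : R.getLast? with
          | none => exact absurd (List.getLast?_eq_none_iff.mp hL) hRe
          | some a => rw [hz a (List.mem_of_getLast? hL)]
        · cases hH : R.head? with
          | none => exact absurd (List.head?_eq_none_iff.mp hH) hRe
          | some a => rw [hz a (List.mem_of_mem_head? hH)]
    by_cases hc2 : R.getLast? = some '0' ∧ R.head? = some '0' ∧ M = -1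
    · rw [if_pos hc2, if_pos (hcond.mp hc2)]
    · rw [if_neg hc2, if_neg (fun h => hc2 (hcond.mpr h))]
      -- branch 3: discard condition and final assembly
      obtain ⟨a, ha⟩ : ∃ a, R.getLast? = some a := by
        cases hL : R.getLast? with
        | none => exact absurd (List.getLast?_eq_none_iff.mp hL) hRe
        | some a => exact ⟨a, rfl⟩
      have hhead : R.reverse.headI = a := by
        have : R.reverse.head? = some a := by rw [List.head?_reverse]; exact ha
        cases hRv : R.reverse with
        | nil => rw [hRv] at this; simp at this
        | cons b t => rw [hRv] at this; simp at this; simp [this]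
      by_cases hz : a = '0'
      · have hA : R.getLast? = some '0' := by rw [ha, hz]
        have hB : R.reverse.headI = '0' := by rw [hhead, hz]
        rw [if_pos hA, if_pos hB]
        simp
      · have hA : ¬ R.getLast? = some '0' := by rw [ha]; simpa using hz
        have hB : ¬ R.reverse.headI = '0' := by rw [hhead]; exact hz
        rw [if_neg hA, if_neg hB, List.reverse_reverse]
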